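-- pv_equiv track=rewrite | github.com/Me-Ryang/mill | 프로그래머스/2/142085. 디펜스 게임/디펜스 게임.py | solution
-- ===== SOURCE A (Python) =====
-- import heapq
--
-- def solution(n, k, enemy):
--
--     answer = 0
--     q = []
--
--     for e in enemy:
--         n -= e
--         heapq.heappush(q, -e)
--         if n < 0:
--             if k < 1:
--                 break
--             else:
--                 k -= 1
--                 num = heapq.heappop(q)
--                 n += -num
--         answer += 1
--
--     return answer
-- ===== SOURCE B (Python) =====
-- def solution(n, k, enemy):
--     # No heap and no push-then-pop: keep the survived hits as a plain unsorted bag.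
--     # A killing hit is either absorbed by a shield outright (when it is at least as
--     # large as every survived hit) or swapped with the largest survived hit.
--     alive = []          # damages currently paid, in arrival order
--     rounds = 0
--     for e in enemy:
--         if e <= n:
--             n -= e
--             alive.append(e)
--         elif k >= 1:
--             k -= 1
--             if alive:
--                 m = max(alive)
--                 if e < m:
--                     alive.remove(m)
--                     alive.append(e)
--                     n += m - e
--             # else: the shield absorbs this hit itself; nothing changes
--         else:
--             break
--         rounds += 1
--     return rounds
-- ===== Notes on version B (the rewrite author's own statement) =====
-- stated objective: alternative
-- what changed: Replaces A's heap and its push-then-pop with an unsorted bag of survived hits: appends are O(1) and only on a killing hit does B scan for max(alive), either absorbing the hit with the shield outright (when it is the largest so far, leaving the state untouched) or swapping it with the largest survived hit.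
import Mathlib
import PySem

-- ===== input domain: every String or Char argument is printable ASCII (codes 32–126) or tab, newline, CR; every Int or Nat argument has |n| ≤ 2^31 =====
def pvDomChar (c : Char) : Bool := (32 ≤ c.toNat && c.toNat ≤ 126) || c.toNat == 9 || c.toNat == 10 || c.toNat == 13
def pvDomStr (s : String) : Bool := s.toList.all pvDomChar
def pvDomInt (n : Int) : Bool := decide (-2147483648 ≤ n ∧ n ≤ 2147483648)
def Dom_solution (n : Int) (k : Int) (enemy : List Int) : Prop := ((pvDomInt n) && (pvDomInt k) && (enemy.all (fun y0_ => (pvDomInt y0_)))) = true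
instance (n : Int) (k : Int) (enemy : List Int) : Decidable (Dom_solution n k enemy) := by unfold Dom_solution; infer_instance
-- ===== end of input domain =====

-- B replaces A's heap (push every hit, pop the max on a killing hit) by an unsorted bag of
-- survived hits with no push-then-pop: a killing hit is either absorbed by a shield outright
-- (when it is at least as large as every survived hit, leaving the state untouched) or
-- swapped with the largest survived hit; same value on every input (alternative decomposition).

-- ===== PORT A =====
-- A's heapq min-heap is ported as the list q of pushed values with heappush = cons and
-- heappop = (first minimal element, remove it): exact for heapq's observable behaviour
-- (heappop returns the smallest stored value), which is all A reads from q.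
def solutionGoA (q : List Int) (n : Int) (k : Int) (answer : Int) (l : List Int) : Int :=
  match l with
  | [] => answer
  | e :: rest =>
    let n1 := n - e
    let q1 := (-e) :: q                            -- heapq.heappush(q, -e)
    if n1 < 0 then
      if k < 1 then answer
      else
        match PySem.List.min? q1 (fun x => x) with  -- num = heapq.heappop(q) (value)
        | none => answer                            -- unreachable: q1 ≠ []
        | some num =>
          match PySem.List.remove? q1 num with      -- heappop removes that element
          | none => answer                          -- unreachable: num ∈ q1
          | some q2 => solutionGoA q2 (n1 + (-num)) (k - 1) (answer + 1) rest
    else solutionGoA q1 n1 k (answer + 1) rest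

def solution (n : Int) (k : Int) (enemy : List Int) : Int :=
  solutionGoA [] n k 0 enemy

-- ===== PORT B =====
def solutionGoB (alive : List Int) (n : Int) (k : Int) (rounds : Int) (l : List Int) : Int :=
  match l with
  | [] => rounds
  | e :: rest =>
    if e ≤ n then solutionGoB (alive ++ [e]) (n - e) k (rounds + 1) rest
    else if 1 ≤ k then
      match PySem.List.max? alive (fun x => x) with      -- m = max(alive)  (alive nonempty)
      | some m =>
        if e < m then
          match PySem.List.remove? alive m with           -- alive.remove(m)
          | some alive2 => solutionGoB (alive2 ++ [e]) (n + m - e) (k - 1) (rounds + 1) rest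
          | none => solutionGoB alive n (k - 1) (rounds + 1) rest   -- unreachable: m ∈ alive
        else solutionGoB alive n (k - 1) (rounds + 1) rest
      | none => solutionGoB alive n (k - 1) (rounds + 1) rest       -- alive empty: shield absorbs the hit
    else rounds

def solution_alt (n : Int) (k : Int) (enemy : List Int) : Int :=
  solutionGoB [] n k 0 enemy

-- ===== PRECONDITION & SPEC =====
def Spec_solution (n : Int) (k : Int) (enemy : List Int) (out : Int) : Prop := out = solution_alt n k enemy
instance (n : Int) (k : Int) (enemy : List Int) (out : Int) : Decidable (Spec_solution n k enemy out) := by unfold Spec_solution; infer_instance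

-- ===== CLAIM (what is proved, stated in full; the proofs are below) =====
def Claim_equal_solution : Prop := ∀ (n : Int) (k : Int) (enemy : List Int), Dom_solution n k enemy → Spec_solution n k enemy (solution n k enemy)

-- ===== LEMMAS AND PROOFS =====

-- the core simulation invariant: B's bag of survived hits is a permutation of the
-- negations of A's heap contents
lemma go_eq (l : List Int) : ∀ (q alive : List Int) (n k answer : Int),
    alive.Perm (q.map (fun x => -x)) →
    solutionGoA q n k answer l = solutionGoB alive n k answer l := by
  induction l with
  | nil => intro q alive n k answer _; rfl
  | cons e rest ih =>
    intro q alive n k answer hperm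
    simp only [solutionGoA, solutionGoB]
    have hq1map : ((-e) :: q).map (fun x => -x) = e :: q.map (fun x => -x) := by simp
    by_cases hne : n - e < 0
    · have hne' : ¬ e ≤ n := by omega
      simp only [if_pos hne, if_neg hne']
      by_cases hk : k < 1
      · have hk' : ¬ 1 ≤ k := by omega
        simp only [if_pos hk, if_neg hk']
      · have hk' : 1 ≤ k := by omega
        simp only [if_neg hk, if_pos hk']
        -- the pop: num is the minimum value of (-e) :: q
        obtain ⟨num, hmin⟩ : ∃ num, PySem.List.min? ((-e) :: q) (fun x => x) = some num := by
          cases hm : PySem.List.min? ((-e) :: q) (fun x => x) with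
          | none => exact absurd ((PySem.List.min?_eq_none_iff _ _).1 hm) (by simp)
          | some v => exact ⟨v, rfl⟩
        have hnum_mem : num ∈ (-e) :: q := PySem.List.min?_mem hmin
        have hnum_min : ∀ y ∈ (-e) :: q, num ≤ y := by
          intro y hy; exact PySem.List.min?_isMin hmin y hy
        -- membership in the bag e :: alive ↔ negated membership in the heap (-e) :: q
        have hmem_map : ∀ x : Int, x ∈ e :: q.map (fun y => -y) ↔ -x ∈ (-e) :: q := by
          intro x
          simp only [List.mem_cons, List.mem_map]
          constructor
          · rintro (rfl | ⟨y, hy, rfl⟩)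
            · exact Or.inl rfl
            · exact Or.inr (by simpa using hy)
          · rintro (h | h)
            · exact Or.inl (by omega)
            · exact Or.inr ⟨-x, h, by ring⟩
        have hmem_iff : ∀ x, x ∈ e :: alive ↔ -x ∈ (-e) :: q := by
          intro x
          rw [(hperm.cons e).mem_iff]
          exact hmem_map x
        -- -num is the maximum of the bag e :: alive
        have hnegnum_mem : -num ∈ e :: alive := by
          have := (hmem_iff (-num)).2 (by simpa using hnum_mem)
          exact this
        have hnegnum_max : ∀ x ∈ e :: alive, x ≤ -num := by
          intro x hx
          have := hnum_min (-x) ((hmem_iff x).1 hx)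
          omega
        simp only [hmin]
        have hrem : PySem.List.remove? ((-e) :: q) num = some (((-e) :: q).erase num) :=
          PySem.List.remove?_eq_some_erase _ num hnum_mem
        set q2 := ((-e) :: q).erase num with hq2
        simp only [hrem]
        have hq2map : q2.map (fun x => -x) = (((-e) :: q).map (fun x => -x)).erase (-num) := by
          rw [hq2]
          exact List.map_erase (fun a b h => by omega) _
        -- case on whether the bag is empty, mirrored by B's max? match
        cases hmax : PySem.List.max? alive (fun x => x) with
        | none =>
          -- alive = [], hence q = [], and the popped value is -e
          have halive : alive = [] := (PySem.List.max?_eq_none_iff _ _).1 hmax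
          have hqnil : q = [] := by
            rw [halive] at hperm
            have := hperm.symm.eq_nil
            cases q with
            | nil => rfl
            | cons a as => simp at this
          subst hqnil
          have hnume : num = -e := by
            have := hnum_mem; simp at this; omega
          have hq2nil : q2 = [] := by rw [hq2, hnume]; simp
          rw [hq2nil, hnume]
          have : n - e + - -e = n := by ring
          rw [this, halive]
          exact ih [] [] n (k - 1) (answer + 1) (by simp)
        | some m =>
          have hm_mem : m ∈ alive := PySem.List.max?_mem hmax
          have hm_max : ∀ y ∈ alive, y ≤ m := by
            intro y hy; exact PySem.List.max?_isMax hmax y hy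
          by_cases hem : e < m
          · -- popped value is m, the largest survived hit
            have hnum : num = -m := by
              have h1 : m ≤ -num := hnegnum_max m (List.mem_cons_of_mem _ hm_mem)
              have h2 : -num ≤ m := by
                rcases List.mem_cons.1 hnegnum_mem with h | h
                · omega
                · exact hm_max _ h
              omega
            subst hnum
            simp only [if_pos hem]
            have hremB : PySem.List.remove? alive m = some (alive.erase m) :=
              PySem.List.remove?_eq_some_erase _ m hm_mem
            simp only [hremB]
            have hmne : e ≠ m := by omega
            have herase : (e :: alive).erase m = e :: alive.erase m :=
              List.erase_cons_tail (by simp [hmne])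
            have hq2perm : (alive.erase m ++ [e]).Perm (q2.map (fun x => -x)) := by
              rw [hq2map, hq1map, neg_neg]
              have h1 : ((e :: q.map (fun x => -x)).erase m).Perm ((e :: alive).erase m) :=
                List.Perm.erase m (hperm.cons e).symm
              rw [herase] at h1
              exact (List.perm_append_singleton e _).trans h1.symm
            have hn' : n - e + - -m = n + m - e := by ring
            rw [hn']
            exact ih q2 (alive.erase m ++ [e]) (n + m - e) (k - 1) (answer + 1) hq2perm
          · -- popped value is e itself: the heap is restored to q, B keeps the bag
            have hnum : num = -e := by
              have h1 : e ≤ -num := hnegnum_max e (List.mem_cons_self ..)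
              have h2 : -num ≤ e := by
                rcases List.mem_cons.1 hnegnum_mem with h | h
                · omega
                · have := hm_max _ h; omega
              omega
            subst hnum
            have hq2q : q2 = q := by rw [hq2]; simp
            rw [hq2q]
            have hn' : n - e + - -e = n := by ring
            rw [hn']
            simp only [if_neg hem]
            exact ih q alive n (k - 1) (answer + 1) hperm
    · have hne' : e ≤ n := by omega
      simp only [if_neg hne, if_pos hne']
      have hperm1 : (alive ++ [e]).Perm (((-e) :: q).map (fun x => -x)) := by
        rw [hq1map]
        exact (List.perm_append_singleton e alive).trans (hperm.cons e)
      exact ih ((-e) :: q) (alive ++ [e]) (n - e) k (answer + 1) hperm1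

-- ===== VERDICT (by name: the statement is the Claim_ definition above) =====
theorem solution_spec : Claim_equal_solution := by
  intro n k enemy _
  unfold Spec_solution solution solution_alt
  exact go_eq enemy [] [] n k 0 (List.Perm.refl _)
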